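-- pv_equiv track=rewrite | github.com/perry-data/tcm-classic-rag | backend/retrieval/production_shadow_logger.py | _failure_code
-- ===== SOURCE A (Python) =====
-- from typing import Any, Mapping
--
-- def _failure_code(raw: Any) -> str:
--     if not raw:
--         return ""
--     text = str(raw)
--     for separator in [":", ";", "\n"]:
--         if separator in text:
--             text = text.split(separator, 1)[0]
--     return text[:80]
-- ===== SOURCE B (Python) =====
-- def _failure_code(raw):
--     # B: single scan for the earliest of ':', ';', '\n' instead of three sequential split passes.
--     if not raw:
--         return ""
--     text = str(raw)
--     pos = next((i for i, c in enumerate(text) if c in ':;\n'), len(text))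
--     return text[:min(pos, 80)]
-- ===== Notes on version B (the rewrite author's own statement) =====
-- stated objective: simpler
-- what changed: Replaces A's three sequential split-at-first-separator passes with one scan that finds the earliest of ':', ';', '\n' and slices once, capped at 80.
import Mathlib
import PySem

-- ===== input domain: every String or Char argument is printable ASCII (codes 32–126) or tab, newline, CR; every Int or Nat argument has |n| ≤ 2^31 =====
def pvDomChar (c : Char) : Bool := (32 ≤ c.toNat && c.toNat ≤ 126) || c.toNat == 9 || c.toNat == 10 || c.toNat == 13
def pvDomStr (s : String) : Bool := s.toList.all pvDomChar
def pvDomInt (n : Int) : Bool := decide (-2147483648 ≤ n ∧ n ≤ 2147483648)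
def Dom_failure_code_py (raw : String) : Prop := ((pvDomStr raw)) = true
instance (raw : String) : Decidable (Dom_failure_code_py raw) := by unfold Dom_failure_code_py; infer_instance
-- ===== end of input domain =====

-- B replaces A's three sequential split-at-first-separator passes with one scan for the
-- earliest of ':', ';', '\n' and a single capped slice (objective: simpler).


-- ===== PORT A =====
def failure_code_py (raw : String) : String :=
  if raw = "" then ""
  else
    -- text = str(raw); for separator in [":", ";", "\n"]: if separator in text: text = text.split(separator, 1)[0]
    let text := [":", ";", "\n"].foldl
      (fun text sep =>
        if PySem.Str.isIn sep text then
          ((PySem.Str.splitMax? text sep 1).getD []).headD ""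
        else text) raw
    PySem.Str.slice text none (some 80)

-- ===== PORT B =====
def failure_code_py_alt (raw : String) : String :=
  if raw = "" then ""
  else
    -- pos = first index whose char is one of ':', ';', '\n' (length if none); return text[:min(pos, 80)]
    let cs := raw.toList
    let pos := cs.findIdx (fun c => c == ':' || c == ';' || c == '\n')
    String.ofList (cs.take (min pos 80))

-- ===== PRECONDITION & SPEC =====
def Spec_failure_code_py (raw : String) (out : String) : Prop := out = failure_code_py_alt raw
instance (raw : String) (out : String) : Decidable (Spec_failure_code_py raw out) := by unfold Spec_failure_code_py; infer_instance

-- ===== CLAIM (what is proved, stated in full; the proofs are below) =====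
def Claim_equal_failure_code_py : Prop := ∀ (raw : String), Dom_failure_code_py raw → Spec_failure_code_py raw (failure_code_py raw)

-- ===== LEMMAS AND PROOFS =====

-- splitOnMax.go with maxsplit budget 0 returns the remainder as one last piece
lemma pv_go_zero (c : Char) : ∀ (fuel : Nat) (l cur : List Char) (acc : List (List Char)),
    PySem.Chars.splitOnMax.go [c] fuel 0 l cur acc = ((cur.reverse ++ l) :: acc).reverse := by
  intro fuel l cur acc
  match fuel, l with
  | 0, l => rw [PySem.Chars.splitOnMax.go]
  | fuel+1, [] => rw [PySem.Chars.splitOnMax.go]; simp; omega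
  | fuel+1, c' :: rest => rw [PySem.Chars.splitOnMax.go]; simp

-- splitOnMax.go with budget 1 and a single-char separator: the first piece is the prefix
-- before the first occurrence of c; the rest (if c occurs) is a single second piece
lemma pv_go_one (c : Char) : ∀ (fuel : Nat) (l cur : List Char) (acc : List (List Char)),
    l.length < fuel →
    PySem.Chars.splitOnMax.go [c] fuel 1 l cur acc =
      ((cur.reverse ++ l.takeWhile (· != c)) :: acc).reverse ++
        (if c ∈ l then [(l.dropWhile (· != c)).drop 1] else []) := by
  intro fuel
  induction fuel with
  | zero => intro l cur acc h; omega
  | succ f ih =>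
    intro l cur acc h
    match l with
    | [] => rw [PySem.Chars.splitOnMax.go]; simp; omega
    | c' :: rest =>
      rw [PySem.Chars.splitOnMax.go]
      simp only [show (1:Nat) ≠ 0 by decide, if_false]
      by_cases hc : c' = c
      · subst hc
        have hpre : [c'].isPrefixOf (c' :: rest) = true := by simp [List.isPrefixOf]
        rw [if_pos hpre]
        rw [pv_go_zero]
        simp [List.takeWhile, List.dropWhile]
      · have hpre : [c].isPrefixOf (c' :: rest) = false := by
          simp [List.isPrefixOf]; exact fun h => absurd h.symm hc
        rw [if_neg (by simp [hpre])]
        rw [ih rest (c' :: cur) acc (by simpa using Nat.lt_of_succ_lt_succ h)]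
        have hne : (c' != c) = true := by simp [hc]
        simp [List.takeWhile, List.dropWhile, hne]
        simp [eq_comm (a := c) (b := c'), hc]

lemma pv_singleton_infix_iff (c : Char) (l : List Char) : ([c] <:+: l) ↔ c ∈ l := by
  constructor
  · rintro ⟨s, t, rfl⟩; simp
  · intro h; obtain ⟨s, t, rfl⟩ := List.mem_iff_append.mp h; exact ⟨s, t, by simp⟩

-- one pass of A's loop body cuts the string at the first occurrence of the (single-char) separator
lemma pv_step_toList (t sep : String) (c : Char) (hsep : sep.toList = [c]) :
    (if PySem.Str.isIn sep t then ((PySem.Str.splitMax? t sep 1).getD []).headD "" else t).toList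
      = t.toList.takeWhile (· != c) := by
  by_cases hin : PySem.Str.isIn sep t = true
  · rw [if_pos hin]
    have hmem : c ∈ t.toList := by
      have := (PySem.Str.isIn_iff_infix sep t).mp hin
      rw [hsep] at this
      exact (pv_singleton_infix_iff c t.toList).mp this
    unfold PySem.Str.splitMax? PySem.Chars.splitMax?
    rw [hsep]
    simp only [List.isEmpty_cons, Bool.false_eq_true, if_false]
    unfold PySem.Chars.splitOnMax
    simp only [show ¬ ((1:Int) < 0) by decide, if_false, Int.toNat_one]
    rw [pv_go_one c (t.toList.length + 1) t.toList [] [] (by omega)]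
    simp [hmem]
  · rw [if_neg hin]
    have hnmem : c ∉ t.toList := by
      intro hm
      exact hin ((PySem.Str.isIn_iff_infix sep t).mpr (by rw [hsep]; exact (pv_singleton_infix_iff c t.toList).mpr hm))
    rw [List.takeWhile_eq_self_iff.mpr]
    intro a ha
    simp only [bne_iff_ne, ne_eq]
    exact fun h => hnmem (h ▸ ha)

lemma pv_take_findIdx (p : Char → Bool) (l : List Char) :
    l.take (l.findIdx p) = l.takeWhile (fun a => !p a) := by
  induction l with
  | nil => simp
  | cons a t ih => by_cases h : p a <;> simp [List.findIdx_cons, List.takeWhile, h, ih]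

-- ===== VERDICT (by name: the statement is the Claim_ definition above) =====
theorem failure_code_py_spec : Claim_equal_failure_code_py := by
  intro raw _
  unfold Spec_failure_code_py failure_code_py failure_code_py_alt
  by_cases hraw : raw = ""
  · simp [hraw]
  · rw [if_neg hraw, if_neg hraw]
    rw [← String.toList_inj]
    rw [PySem.Str.toList_slice, PySem.Chars.slice_eq_listSlice,
        PySem.List.slice_to _ (by norm_num : (0:Int) ≤ 80)]
    simp only [List.foldl]
    rw [pv_step_toList _ "\n" '\n' (by decide)]
    rw [pv_step_toList _ ";" ';' (by decide)]
    rw [pv_step_toList _ ":" ':' (by decide)]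
    rw [String.toList_ofList]
    rw [min_comm, ← List.take_take, pv_take_findIdx]
    norm_num
    rw [List.takeWhile_takeWhile, List.takeWhile_takeWhile]
    have hpred : (fun a : Char => decide (decide ((a != '\n') = true ∧ (a != ';') = true) = true ∧ (a != ':') = true))
        = (fun a : Char => !a == ':' && !a == ';' && !a == '\n') := by
      funext a
      by_cases h1 : a = ':' <;> by_cases h2 : a = ';' <;> by_cases h3 : a = '\n' <;>
        simp [h1, h2, h3]
    rw [hpred]
    rfl
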